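-- pv_equiv track=rewrite | github.com/lclong728/Daily-Coding-Problem | problem #1-#20/dailyCoding#9.py | helper
-- ===== SOURCE A (Python) =====
-- def helper(array, idx, max_sum):
--     position_para= 2
--     if idx + 2 < len(array):
--         while idx + position_para < len(array):
--             if array[idx] + array[idx + position_para] > max_sum:
--                 max_sum = array[idx] + array[idx + position_para]
--             position_para += 1
--         return helper(array, idx + 1, max_sum)
--     else:
--         return max_sum
-- ===== SOURCE B (Python) =====
-- def helper(array, idx, max_sum):
--     # Single pass: keep the running max of array[i] for idx <= i <= j-2
--     # while j sweeps the second element of the pair.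
--     n = len(array)
--     best = None
--     for j in range(idx + 2, n):
--         v = array[j - 2]
--         if best is None or v > best:
--             best = v
--         s = best + array[j]
--         if s > max_sum:
--             max_sum = s
--     return max_sum
-- ===== Notes on version B (the rewrite author's own statement) =====
-- stated objective: faster
-- what changed: Replaced the recursion over idx with a nested rescan per row (O(n^2) pair sums) by a single forward pass that maintains the running maximum of array[i] for i <= j-2 and combines it with array[j].
import Mathlib
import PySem

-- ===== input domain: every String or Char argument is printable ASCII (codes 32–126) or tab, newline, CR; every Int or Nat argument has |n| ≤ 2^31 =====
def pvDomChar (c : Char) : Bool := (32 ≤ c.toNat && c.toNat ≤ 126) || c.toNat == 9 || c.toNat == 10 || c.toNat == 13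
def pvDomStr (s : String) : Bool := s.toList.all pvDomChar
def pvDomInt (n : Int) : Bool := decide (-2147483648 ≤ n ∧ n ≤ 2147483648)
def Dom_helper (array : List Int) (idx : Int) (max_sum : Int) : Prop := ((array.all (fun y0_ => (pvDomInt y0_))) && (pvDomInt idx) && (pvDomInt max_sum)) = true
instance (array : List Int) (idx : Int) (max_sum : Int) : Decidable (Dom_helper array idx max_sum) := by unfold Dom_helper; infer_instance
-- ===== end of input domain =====

-- B replaces A's per-row rescan recursion (quadratic in pair sums) by one forward pass
-- keeping the running maximum of array[i] for i ≤ j-2; objective: faster (asymptotic).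

-- ===== PORT A =====
-- the inner 'while idx + position_para < len(array)' loop of A
def scanA (array : List Int) (idx : Int) (pos : Int) (max_sum : Int) : Int :=
  if _h : idx + pos < (array.length : Int) then
    scanA array idx (pos + 1)
      (if PySem.List.pyGetD array idx 0 + PySem.List.pyGetD array (idx + pos) 0 > max_sum
       then PySem.List.pyGetD array idx 0 + PySem.List.pyGetD array (idx + pos) 0
       else max_sum)
  else max_sum
termination_by ((array.length : Int) - (idx + pos)).toNat
decreasing_by omega

def helper (array : List Int) (idx : Int) (max_sum : Int) : Int :=
  if _h : idx + 2 < (array.length : Int) then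
    helper array (idx + 1) (scanA array idx 2 max_sum)
  else max_sum
termination_by ((array.length : Int) - idx).toNat
decreasing_by omega

-- ===== PORT B =====
def helper_alt (array : List Int) (idx : Int) (max_sum : Int) : Int :=
  let n : Int := array.length
  ((PySem.List.pyRange (idx + 2) n 1).foldl
    (fun (st : Option Int × Int) (j : Int) =>
      let v := PySem.List.pyGetD array (j - 2) 0
      let best := match st.1 with
        | none => v
        | some b => if v > b then v else b
      let s := best + PySem.List.pyGetD array j 0
      (some best, if s > st.2 then s else st.2))
    (none, max_sum)).2

-- ===== PRECONDITION & SPEC =====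
-- Pre_ excludes exactly the inputs where Python A raises IndexError (array[idx] with
-- idx < -len(array) while the loop is entered); Python B raises on the same inputs.
def Pre_helper (array : List Int) (idx : Int) (max_sum : Int) : Prop :=
  (array.length : Int) ≤ idx + 2 ∨ -(array.length : Int) ≤ idx
instance (array : List Int) (idx : Int) (max_sum : Int) : Decidable (Pre_helper array idx max_sum) := by unfold Pre_helper; infer_instance

def pvWitness_helper : List Int × Int × Int := ([3, 6, 9, 2, 5], 0, 0)

def Spec_helper (array : List Int) (idx : Int) (max_sum : Int) (out : Int) : Prop := out = helper_alt array idx max_sum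
instance (array : List Int) (idx : Int) (max_sum : Int) (out : Int) : Decidable (Spec_helper array idx max_sum out) := by unfold Spec_helper; infer_instance

-- ===== CLAIM (what is proved, stated in full; the proofs are below) =====
def Claim_equal_helper : Prop := ∀ (array : List Int) (idx : Int) (max_sum : Int), Dom_helper array idx max_sum → Pre_helper array idx max_sum → Spec_helper array idx max_sum (helper array idx max_sum)

-- ===== LEMMAS AND PROOFS =====

-- common characterisation: r is the max of ms and all pair sums a[i]+a[j], idx ≤ i, i+2 ≤ j < n
def Pgood (array : List Int) (idx ms r : Int) : Prop :=
  ms ≤ r ∧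
  (∀ i j : Int, idx ≤ i → i + 2 ≤ j → j < (array.length : Int) →
      PySem.List.pyGetD array i 0 + PySem.List.pyGetD array j 0 ≤ r) ∧
  (r = ms ∨ ∃ i j : Int, idx ≤ i ∧ i + 2 ≤ j ∧ j < (array.length : Int) ∧
      r = PySem.List.pyGetD array i 0 + PySem.List.pyGetD array j 0)

theorem Pgood_unique (array : List Int) (idx ms r1 r2 : Int)
    (h1 : Pgood array idx ms r1) (h2 : Pgood array idx ms r2) : r1 = r2 := by
  obtain ⟨hm1, hp1, hc1⟩ := h1
  obtain ⟨hm2, hp2, hc2⟩ := h2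
  apply le_antisymm
  · rcases hc1 with h | ⟨i, j, hi, hij, hj, h⟩
    · omega
    · have := hp2 i j hi hij hj; omega
  · rcases hc2 with h | ⟨i, j, hi, hij, hj, h⟩
    · omega
    · have := hp1 i j hi hij hj; omega

theorem scanA_stop (array : List Int) (idx pos ms : Int) (h : ¬ idx + pos < (array.length : Int)) :
    scanA array idx pos ms = ms := by
  conv_lhs => rw [scanA]
  rw [dif_neg h]

theorem scanA_step (array : List Int) (idx pos ms : Int) (h : idx + pos < (array.length : Int)) :
    scanA array idx pos ms = scanA array idx (pos + 1)
      (if PySem.List.pyGetD array idx 0 + PySem.List.pyGetD array (idx + pos) 0 > ms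
       then PySem.List.pyGetD array idx 0 + PySem.List.pyGetD array (idx + pos) 0
       else ms) := by
  conv_lhs => rw [scanA]
  rw [dif_pos h]

theorem helper_stop (array : List Int) (idx ms : Int) (h : ¬ idx + 2 < (array.length : Int)) :
    helper array idx ms = ms := by
  conv_lhs => rw [helper]
  rw [dif_neg h]

theorem helper_step (array : List Int) (idx ms : Int) (h : idx + 2 < (array.length : Int)) :
    helper array idx ms = helper array (idx + 1) (scanA array idx 2 ms) := by
  conv_lhs => rw [helper]
  rw [dif_pos h]

theorem scanA_spec (array : List Int) (idx : Int) : ∀ (pos ms : Int),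
    ms ≤ scanA array idx pos ms ∧
    (∀ j : Int, idx + pos ≤ j → j < (array.length : Int) →
        PySem.List.pyGetD array idx 0 + PySem.List.pyGetD array j 0 ≤ scanA array idx pos ms) ∧
    (scanA array idx pos ms = ms ∨ ∃ j : Int, idx + pos ≤ j ∧ j < (array.length : Int) ∧
        scanA array idx pos ms = PySem.List.pyGetD array idx 0 + PySem.List.pyGetD array j 0) := by
  intro pos ms
  induction pos, ms using scanA.induct array idx with
  | case1 pos ms h ih =>
    obtain ⟨ih1, ih2, ih3⟩ := ih
    simp only [dite_eq_ite] at ih1 ih2 ih3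
    rw [scanA_step array idx pos ms h]
    set s := PySem.List.pyGetD array idx 0 + PySem.List.pyGetD array (idx + pos) 0 with hs
    set ms' := if s > ms then s else ms with hms'
    have hms1 : ms ≤ ms' := by rw [hms']; split_ifs <;> omega
    have hsms : s ≤ ms' := by rw [hms']; split_ifs <;> omega
    refine ⟨by omega, ?_, ?_⟩
    · intro j hj1 hj2
      rcases eq_or_lt_of_le hj1 with heq | hlt
      · rw [← heq, ← hs]; omega
      · exact ih2 j (by omega) hj2
    · rcases ih3 with h' | ⟨j, hj1, hj2, hj3⟩
      · rw [h', hms']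
        split_ifs with hgt
        · exact Or.inr ⟨idx + pos, le_refl _, h, hs⟩
        · exact Or.inl rfl
      · exact Or.inr ⟨j, by omega, hj2, hj3⟩
  | case2 pos ms h =>
    rw [scanA_stop array idx pos ms h]
    exact ⟨le_refl _, fun j hj1 hj2 => absurd hj2 (by omega), Or.inl rfl⟩

theorem helper_good (array : List Int) : ∀ (idx ms : Int),
    Pgood array idx ms (helper array idx ms) := by
  intro idx ms
  induction idx, ms using helper.induct array with
  | case1 idx ms h ih =>
    rw [helper_step array idx ms h]
    obtain ⟨s1, s2, s3⟩ := scanA_spec array idx 2 ms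
    obtain ⟨ih1, ih2, ih3⟩ := ih
    refine ⟨by omega, ?_, ?_⟩
    · intro i j hi hij hj
      rcases eq_or_lt_of_le hi with heq | hlt
      · have := s2 j (by omega) hj
        rw [← heq]; omega
      · exact ih2 i j (by omega) hij hj
    · rcases ih3 with h' | ⟨i, j, hi, hij, hj, hr⟩
      · rw [h']
        rcases s3 with h'' | ⟨j, hj1, hj2, hj3⟩
        · exact Or.inl h''
        · exact Or.inr ⟨idx, j, le_refl _, by omega, hj2, hj3⟩
      · exact Or.inr ⟨i, j, by omega, hij, hj, hr⟩
  | case2 idx ms h =>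
    rw [helper_stop array idx ms h]
    exact ⟨le_refl _, fun i j hi hij hj => absurd hj (by omega), Or.inl rfl⟩

-- B-side: the loop body and the fold over the remaining range, named for the proofs
def stepB (array : List Int) (st : Option Int × Int) (j : Int) : Option Int × Int :=
  let v := PySem.List.pyGetD array (j - 2) 0
  let best := match st.1 with
    | none => v
    | some b => if v > b then v else b
  let s := best + PySem.List.pyGetD array j 0
  (some best, if s > st.2 then s else st.2)

def altFold (array : List Int) (j0 : Int) (st : Option Int × Int) : Option Int × Int :=
  (PySem.List.pyRange j0 (array.length : Int) 1).foldl (stepB array) st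

theorem helper_alt_eq_altFold (array : List Int) (idx ms : Int) :
    helper_alt array idx ms = (altFold array (idx + 2) (none, ms)).2 := rfl

theorem altFold_nil (array : List Int) (j0 : Int) (st : Option Int × Int)
    (h : (array.length : Int) ≤ j0) : altFold array j0 st = st := by
  rw [altFold, PySem.List.pyRange_one_eq_nil h]; rfl

theorem altFold_cons (array : List Int) (j0 : Int) (st : Option Int × Int)
    (h : j0 < (array.length : Int)) :
    altFold array j0 st = altFold array (j0 + 1) (stepB array st j0) := by
  rw [altFold, PySem.List.pyRange_one_cons h, List.foldl_cons]; rfl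

theorem altFold_spec (array : List Int) : ∀ (k : Nat) (j0 b m : Int),
    (((array.length : Int) - j0).toNat ≤ k) →
    m ≤ (altFold array j0 (some b, m)).2 ∧
    (∀ j : Int, j0 ≤ j → j < (array.length : Int) →
        b + PySem.List.pyGetD array j 0 ≤ (altFold array j0 (some b, m)).2) ∧
    (∀ i j : Int, j0 - 2 ≤ i → i + 2 ≤ j → j < (array.length : Int) →
        PySem.List.pyGetD array i 0 + PySem.List.pyGetD array j 0 ≤ (altFold array j0 (some b, m)).2) ∧
    ((altFold array j0 (some b, m)).2 = m ∨
     (∃ j : Int, j0 ≤ j ∧ j < (array.length : Int) ∧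
        (altFold array j0 (some b, m)).2 = b + PySem.List.pyGetD array j 0) ∨
     (∃ i j : Int, j0 - 2 ≤ i ∧ i + 2 ≤ j ∧ j < (array.length : Int) ∧
        (altFold array j0 (some b, m)).2 = PySem.List.pyGetD array i 0 + PySem.List.pyGetD array j 0)) := by
  intro k
  induction k with
  | zero =>
    intro j0 b m hk
    rw [altFold_nil array j0 _ (by omega)]
    exact ⟨le_refl _, fun j h1 h2 => absurd h2 (by omega),
           fun i j h1 h2 h3 => absurd h3 (by omega), Or.inl rfl⟩
  | succ k ih =>
    intro j0 b m hk
    by_cases h : j0 < (array.length : Int)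
    · rw [altFold_cons array j0 _ h]
      have hstep : stepB array (some b, m) j0 =
          (some (if PySem.List.pyGetD array (j0 - 2) 0 > b then PySem.List.pyGetD array (j0 - 2) 0 else b),
           if (if PySem.List.pyGetD array (j0 - 2) 0 > b then PySem.List.pyGetD array (j0 - 2) 0 else b)
                + PySem.List.pyGetD array j0 0 > m
           then (if PySem.List.pyGetD array (j0 - 2) 0 > b then PySem.List.pyGetD array (j0 - 2) 0 else b)
                + PySem.List.pyGetD array j0 0
           else m) := rfl
      rw [hstep]
      set v := PySem.List.pyGetD array (j0 - 2) 0 with hv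
      set best := if v > b then v else b with hbest
      set s := best + PySem.List.pyGetD array j0 0 with hs
      set m' := if s > m then s else m with hm'
      obtain ⟨ih1, ih2, ih3, ih4⟩ := ih (j0 + 1) best m' (by omega)
      have hbb : b ≤ best := by rw [hbest]; split_ifs <;> omega
      have hvb : v ≤ best := by rw [hbest]; split_ifs <;> omega
      have hmm : m ≤ m' := by rw [hm']; split_ifs <;> omega
      have hsm : s ≤ m' := by rw [hm']; split_ifs <;> omega
      refine ⟨by omega, ?_, ?_, ?_⟩
      · intro j hj1 hj2
        rcases eq_or_lt_of_le hj1 with heq | hlt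
        · subst heq; have : b + PySem.List.pyGetD array j0 0 ≤ s := by rw [hs]; omega
          omega
        · have := ih2 j (by omega) hj2; omega
      · intro i j hi hij hj
        rcases eq_or_lt_of_le hi with heq | hlt
        · -- i = j0 - 2, so a[i] = v ≤ best
          have hgi : PySem.List.pyGetD array i 0 = v := by rw [hv, ← heq]
          rcases eq_or_lt_of_le (show j0 ≤ j by omega) with heq2 | hlt2
          · have : PySem.List.pyGetD array i 0 + PySem.List.pyGetD array j 0 ≤ s := by
              rw [hs, ← heq2, hgi]; omega
            omega
          · have := ih2 j (by omega) hj; omega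
        · exact ih3 i j (by omega) hij hj
      · rcases ih4 with h' | ⟨j, hj1, hj2, hj3⟩ | ⟨i, j, hi, hij, hj, hr⟩
        · rw [h', hm']
          split_ifs with hgt
          · rw [hs, hbest]
            split_ifs with hgt2
            · exact Or.inr (Or.inr ⟨j0 - 2, j0, by omega, by omega, h, by rw [hv]⟩)
            · exact Or.inr (Or.inl ⟨j0, le_refl _, h, rfl⟩)
          · exact Or.inl rfl
        · rw [hj3, hbest]
          split_ifs with hgt2
          · exact Or.inr (Or.inr ⟨j0 - 2, j, by omega, by omega, hj2, by rw [hv]⟩)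
          · exact Or.inr (Or.inl ⟨j, by omega, hj2, rfl⟩)
        · exact Or.inr (Or.inr ⟨i, j, by omega, hij, hj, hr⟩)
    · rw [altFold_nil array j0 _ (by omega)]
      exact ⟨le_refl _, fun j h1 h2 => absurd h2 (by omega),
             fun i j h1 h2 h3 => absurd h3 (by omega), Or.inl rfl⟩

theorem helper_alt_good (array : List Int) (idx ms : Int) :
    Pgood array idx ms (helper_alt array idx ms) := by
  rw [helper_alt_eq_altFold]
  by_cases h : idx + 2 < (array.length : Int)
  · rw [altFold_cons array _ _ h]
    have h23 : idx + 2 + 1 = idx + 3 := by ring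
    rw [h23]
    have hidx : idx + 2 - 2 = idx := by ring
    have hstep : stepB array (none, ms) (idx + 2) =
        (some (PySem.List.pyGetD array idx 0),
         if PySem.List.pyGetD array idx 0 + PySem.List.pyGetD array (idx + 2) 0 > ms
         then PySem.List.pyGetD array idx 0 + PySem.List.pyGetD array (idx + 2) 0
         else ms) := by
      show (some (PySem.List.pyGetD array (idx + 2 - 2) 0), _) = _
      rw [hidx]
    rw [hstep]
    set s := PySem.List.pyGetD array idx 0 + PySem.List.pyGetD array (idx + 2) 0 with hsdef
    set m' := if s > ms then s else ms with hm'
    obtain ⟨h1, h2, h3, h4⟩ := altFold_spec array ((array.length : Int) - (idx + 3)).toNat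
      (idx + 3) (PySem.List.pyGetD array idx 0) m' (le_refl _)
    have hmm : ms ≤ m' := by rw [hm']; split_ifs <;> omega
    have hsm : s ≤ m' := by rw [hm']; split_ifs <;> omega
    refine ⟨by omega, ?_, ?_⟩
    · intro i j hi hij hj
      rcases eq_or_lt_of_le hi with heq | hlt
      · rcases eq_or_lt_of_le hij with heq2 | hlt2
        · rw [← heq2, ← heq, ← hsdef]; omega
        · have := h2 j (by omega) hj
          rw [← heq]; omega
      · exact h3 i j (by omega) hij hj
    · rcases h4 with h' | ⟨j, hj1, hj2, hj3⟩ | ⟨i, j, hi, hij, hj, hr⟩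
      · rw [h', hm']
        split_ifs with hgt
        · exact Or.inr ⟨idx, idx + 2, le_refl _, le_refl _, h, hsdef⟩
        · exact Or.inl rfl
      · exact Or.inr ⟨idx, j, le_refl _, by omega, hj2, hj3⟩
      · exact Or.inr ⟨i, j, by omega, hij, hj, hr⟩
  · rw [altFold_nil array _ _ (by omega)]
    exact ⟨le_refl _, fun i j hi hij hj => absurd hj (by omega), Or.inl rfl⟩

-- ===== VERDICT (by name: the statement is the Claim_ definition above) =====
theorem helper_spec : Claim_equal_helper := by
  intro array idx ms _ _
  exact Pgood_unique array idx ms _ _ (helper_good array idx ms) (helper_alt_good array idx ms)
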